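-- pv_equiv track=rewrite | github.com/kelvincaoyx/APS106-Notes | week7/answer/5.py | find_students_with_grade_nested
-- ===== SOURCE A (Python) =====
-- def find_students_with_grade_nested(all_marks, grade):
--     ''' (list, str) -> list
--     Returns a list of students who received a mark equal to grade
--     in any course.
--     '''
--     students_with_grade = []
--     for record in all_marks:
--         name = record[0]
--         for mark in record[1]:
--             if mark == grade and name not in students_with_grade:
--                 students_with_grade.append(record[0])
--
--     return students_with_grade
-- ===== SOURCE B (Python) =====
-- def find_students_with_grade_nested(all_marks, grade):
--     result = []
--     remaining = list(all_marks)
--     while remaining: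
--         record = remaining[0]
--         remaining = remaining[1:]
--         if grade in record[1]:
--             result.append(record[0])
--             remaining = [r for r in remaining if r[0] != record[0]]
--     return result
-- ===== Notes on version B (the rewrite author's own statement) =====
-- stated objective: alternative
-- what changed: Replaces A's nested mark loop with an inline not-in membership test on the growing output by a worklist algorithm: pop the first remaining record, report its name if its mark list contains the grade, and then delete every later record with that name from the worklist, so the output never needs a duplicate check.
import Mathlib
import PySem

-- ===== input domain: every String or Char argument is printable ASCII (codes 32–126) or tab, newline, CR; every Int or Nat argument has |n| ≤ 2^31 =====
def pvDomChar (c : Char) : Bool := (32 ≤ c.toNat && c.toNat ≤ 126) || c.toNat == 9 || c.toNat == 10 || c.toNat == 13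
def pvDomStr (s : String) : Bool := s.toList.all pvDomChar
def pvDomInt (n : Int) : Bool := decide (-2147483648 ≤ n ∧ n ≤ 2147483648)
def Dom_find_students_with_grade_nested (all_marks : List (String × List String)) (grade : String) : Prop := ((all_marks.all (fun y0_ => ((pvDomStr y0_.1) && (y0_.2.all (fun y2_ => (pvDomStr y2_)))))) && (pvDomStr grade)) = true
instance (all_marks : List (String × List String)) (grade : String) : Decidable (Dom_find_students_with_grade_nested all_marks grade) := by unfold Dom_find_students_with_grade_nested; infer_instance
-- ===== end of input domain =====

-- B replaces A's inline `not in` duplicate guard by a worklist algorithm that deletes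
-- future records of a reported name from the remaining input; objective: alternative.


-- ===== PORT A =====
-- single pass: for each record, for each mark, append the name if it matches and is not yet listed
def find_students_with_grade_nested (all_marks : List (String × List String)) (grade : String) : List String :=
  all_marks.foldl (fun students_with_grade record =>
    let name := record.1
    record.2.foldl (fun acc mark =>
      if mark = grade ∧ name ∉ acc then acc ++ [record.1] else acc) students_with_grade) []

-- ===== PORT B =====
-- the while loop: pop the first record, report its name if it qualifies, then delete
-- every later record carrying that name from the worklist
def pvAltLoop (grade : String) : List (String × List String) → List String → List String
  | [], result => result
  | record :: remaining, result =>
    if grade ∈ record.2 then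
      pvAltLoop grade (remaining.filter (fun r => r.1 ≠ record.1)) (result ++ [record.1])
    else
      pvAltLoop grade remaining result
  termination_by remaining _ => remaining.length
  decreasing_by
    · simp only [List.length_unattach]
      exact Nat.lt_succ_of_le (le_trans (List.length_filter_le _ _) (by simp))
    · exact Nat.lt_succ_self _

def find_students_with_grade_nested_alt (all_marks : List (String × List String)) (grade : String) : List String :=
  pvAltLoop grade all_marks []

-- ===== PRECONDITION & SPEC =====
def Spec_find_students_with_grade_nested (all_marks : List (String × List String)) (grade : String) (out : List String) : Prop := out = find_students_with_grade_nested_alt all_marks grade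
instance (all_marks : List (String × List String)) (grade : String) (out : List String) : Decidable (Spec_find_students_with_grade_nested all_marks grade out) := by unfold Spec_find_students_with_grade_nested; infer_instance

-- ===== CLAIM (what is proved, stated in full; the proofs are below) =====
def Claim_equal_find_students_with_grade_nested : Prop := ∀ (all_marks : List (String × List String)) (grade : String), Dom_find_students_with_grade_nested all_marks grade → Spec_find_students_with_grade_nested all_marks grade (find_students_with_grade_nested all_marks grade)

-- ===== LEMMAS AND PROOFS =====

-- A's inner loop over a record's marks appends the name once iff the grade occurs and the name is new
theorem pv_inner_loop (grade name : String) (marks acc : List String) :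
    marks.foldl (fun a mark => if mark = grade ∧ name ∉ a then a ++ [name] else a) acc
      = if grade ∈ marks ∧ name ∉ acc then acc ++ [name] else acc := by
  induction marks generalizing acc with
  | nil => simp
  | cons m rest ih =>
    simp only [List.foldl_cons, ih]
    by_cases hm : m = grade
    · subst hm
      by_cases hn : name ∈ acc
      · simp [hn]
      · simp [hn]
    · by_cases hn : name ∈ acc
      · simp [hm, hn]
      · simp [hm, Ne.symm hm, hn]

-- folding Set.add over names already in the accumulator deletes nothing new:
-- filtering them out of the list first does not change the result
theorem pv_fold_filter (x : String) (l acc : List String) (hx : x ∈ acc) :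
    (l.filter (fun y => y ≠ x)).foldl PySem.Set.add acc = l.foldl PySem.Set.add acc := by
  simp only [ne_eq]
  induction l generalizing acc with
  | nil => rfl
  | cons h rest ih =>
    by_cases hh : h = x
    · subst hh
      have hadd : PySem.Set.add acc h = acc := by simp [PySem.Set.add, hx]
      simpa [hadd] using ih acc hx
    · have hx' : x ∈ PySem.Set.add acc h := by
        simp [PySem.Set.add]; split <;> simp [hx]
      simpa [hh] using ih _ hx'

-- B's worklist loop equals folding Set.add over the qualifying names,
-- provided no name of the worklist is already in the output
theorem pv_loop_as_fold (grade : String) (l : List (String × List String)) (acc : List String)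
    (h : ∀ r ∈ l, r.1 ∉ acc) :
    pvAltLoop grade l acc
      = ((l.filter (fun record => decide (grade ∈ record.2))).map (fun record => record.1)).foldl
          PySem.Set.add acc := by
  induction hl : l.length using Nat.strong_induction_on generalizing l acc with
  | _ n ih =>
    cases l with
    | nil => simp [pvAltLoop]
    | cons r rest =>
      subst hl
      by_cases hg : grade ∈ r.2
      · have hr : r.1 ∉ acc := h r (by simp)
        have hadd : PySem.Set.add acc r.1 = acc ++ [r.1] := by simp [PySem.Set.add, hr]
        rw [pvAltLoop, if_pos hg]
        have hlen : (rest.filter (fun x => x.1 ≠ r.1)).length < (r :: rest).length :=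
          Nat.lt_succ_of_le (List.length_filter_le _ _)
        have h' : ∀ s ∈ rest.filter (fun x => x.1 ≠ r.1), s.1 ∉ acc ++ [r.1] := by
          intro s hs
          have hs1 := List.of_mem_filter hs
          have hs2 := h s (by simp [List.mem_of_mem_filter hs])
          simp at hs1 ⊢
          exact ⟨hs2, hs1⟩
        rw [ih _ hlen _ _ h' rfl]
        have hcomm : ((rest.filter (fun x => x.1 ≠ r.1)).filter
              (fun record => decide (grade ∈ record.2))).map (fun record => record.1)
            = ((rest.filter (fun record => decide (grade ∈ record.2))).map
                (fun record => record.1)).filter (fun y => y ≠ r.1) := by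
          rw [List.filter_comm, List.filter_map]
          rfl
        rw [hcomm, pv_fold_filter r.1 _ _ (by simp)]
        simp [hg, hadd]
      · rw [pvAltLoop, if_neg hg]
        have h' : ∀ s ∈ rest, s.1 ∉ acc := fun s hs => h s (by simp [hs])
        rw [ih rest.length (by simp) rest acc h' rfl]
        simp [hg]

-- A's outer loop equals folding Set.add over the qualifying names
theorem pv_outer (grade : String) (l : List (String × List String)) (acc : List String) :
    l.foldl (fun students_with_grade record =>
        record.2.foldl (fun a mark =>
          if mark = grade ∧ record.1 ∉ a then a ++ [record.1] else a) students_with_grade) acc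
      = ((l.filter (fun record => decide (grade ∈ record.2))).map (fun record => record.1)).foldl
          PySem.Set.add acc := by
  induction l generalizing acc with
  | cons r rest ih =>
    simp only [List.foldl_cons, pv_inner_loop grade r.1 r.2 acc]
    by_cases hg : grade ∈ r.2
    · by_cases hn : r.1 ∈ acc
      · simp [hg, hn, ih, PySem.Set.add]
      · simp [hg, hn, ih, PySem.Set.add]
    · simp [hg, ih]
  | nil => simp

-- ===== VERDICT (by name: the statement is the Claim_ definition above) =====
theorem find_students_with_grade_nested_spec : Claim_equal_find_students_with_grade_nested := by
  intro all_marks grade _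
  unfold Spec_find_students_with_grade_nested find_students_with_grade_nested find_students_with_grade_nested_alt
  rw [pv_outer grade all_marks [], pv_loop_as_fold grade all_marks [] (by simp)]
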